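-- pv_equiv track=rewrite | github.com/Mig1a/DSA-Solution | Unit 2/sess-1/Advanced/P3 - Souvenir Declutter.py | declutter
-- ===== SOURCE A (Python) =====
-- def declutter(souvenirs, threshold):
--     store = {}
--
--     for i in souvenirs:
--         if i in store:
--             store[i] += 1
--         else:
--             store[i] = 1
--     res = [s for s in souvenirs if store[s] < threshold]
--
--     return res
-- ===== SOURCE B (Python) =====
-- def declutter(souvenirs, threshold):
--     # sort-then-run-scan: find cluttered values as runs of length >= threshold
--     # in the sorted copy, then keep the elements not in that set
--     clutter = set()
--     prev = None
--     run = 0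
--     for x in sorted(souvenirs):
--         if run > 0 and x == prev:
--             run += 1
--         else:
--             if run >= threshold:
--                 clutter.add(prev)
--             prev = x
--             run = 1
--     if run >= threshold:
--         clutter.add(prev)
--     return [s for s in souvenirs if s not in clutter]
-- ===== Notes on version B (the rewrite author's own statement) =====
-- stated objective: alternative
-- what changed: Replaces the hash-map frequency count with sort-then-run-scan: B sorts a copy, scans it once tracking the length of each run of equal values to collect the set of over-threshold values, then keeps the elements outside that set.
import Mathlib
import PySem

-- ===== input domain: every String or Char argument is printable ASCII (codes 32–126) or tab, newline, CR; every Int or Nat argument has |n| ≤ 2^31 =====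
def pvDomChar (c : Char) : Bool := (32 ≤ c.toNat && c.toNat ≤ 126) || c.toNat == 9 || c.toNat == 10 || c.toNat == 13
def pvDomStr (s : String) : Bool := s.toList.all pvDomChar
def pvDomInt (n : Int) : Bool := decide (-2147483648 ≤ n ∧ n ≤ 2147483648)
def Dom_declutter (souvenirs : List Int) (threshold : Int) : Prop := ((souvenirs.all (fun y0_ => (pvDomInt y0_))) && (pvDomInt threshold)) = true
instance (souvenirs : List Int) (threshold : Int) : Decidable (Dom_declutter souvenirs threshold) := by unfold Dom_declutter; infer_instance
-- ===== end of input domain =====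

-- B replaces A's hash-map frequency count by sort-then-run-scan over a sorted copy (alternative algorithm; not faster).

-- ===== PORT A =====
-- the counting loop: if i in store: store[i] += 1 else: store[i] = 1
def declutterStep (store : PySem.Dict Int Int) (i : Int) : PySem.Dict Int Int :=
  if store.contains i then store.modify i 0 (· + 1) else store.insert i 1
-- store[s] in the comprehension: s always occurs in souvenirs, hence is a key of store,
-- so store.getD s 0 is exact (no KeyError is reachable).
def declutter (souvenirs : List Int) (threshold : Int) : List Int :=
  let store := souvenirs.foldl declutterStep PySem.Dict.empty
  souvenirs.filter (fun s => decide (store.getD s 0 < threshold))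

-- ===== PORT B =====
-- the loop body over sorted(souvenirs): state (clutter, prev, run)
def declutterRunStep (threshold : Int) (st : PySem.Set (Option Int) × Option Int × Int) (x : Int) :
    PySem.Set (Option Int) × Option Int × Int :=
  let (clutter, prev, run) := st
  if 0 < run ∧ prev = some x then (clutter, prev, run + 1)
  else ((if threshold ≤ run then clutter.add prev else clutter), some x, 1)
def declutter_alt (souvenirs : List Int) (threshold : Int) : List Int :=
  let st := (PySem.List.sorted souvenirs (fun v => v) false).foldl (declutterRunStep threshold)
      (PySem.Set.empty, none, 0)
  let clutter := if threshold ≤ st.2.2 then st.1.add st.2.1 else st.1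
  souvenirs.filter (fun s => !(clutter.contains (some s)))

-- ===== PRECONDITION & SPEC =====
def Spec_declutter (souvenirs : List Int) (threshold : Int) (out : List Int) : Prop := out = declutter_alt souvenirs threshold
instance (souvenirs : List Int) (threshold : Int) (out : List Int) : Decidable (Spec_declutter souvenirs threshold out) := by unfold Spec_declutter; infer_instance

-- ===== CLAIM (what is proved, stated in full; the proofs are below) =====
def Claim_equal_declutter : Prop := ∀ (souvenirs : List Int) (threshold : Int), Dom_declutter souvenirs threshold → Spec_declutter souvenirs threshold (declutter souvenirs threshold)

-- ===== LEMMAS AND PROOFS =====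

theorem declutterStep_getD (d : PySem.Dict Int Int) (i s : Int) :
    (declutterStep d i).getD s 0 = if s = i then d.getD s 0 + 1 else d.getD s 0 := by
  unfold declutterStep
  by_cases hs : s = i
  · subst hs
    by_cases hc : d.contains s
    · simp [hc]
    · have h0 : d.getD s 0 = 0 :=
        PySem.Dict.getD_of_not_contains d 0 (by simpa using hc)
      simp [hc, h0]
  · by_cases hc : d.contains i <;>
      simp [hc, PySem.Dict.getD_modify, PySem.Dict.getD_insert, hs]

theorem foldl_declutterStep_getD (xs : List Int) (d : PySem.Dict Int Int) (s : Int) :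
    (xs.foldl declutterStep d).getD s 0 = d.getD s 0 + (xs.count s : Int) := by
  induction xs generalizing d with
  | nil => simp
  | cons x xs ih =>
    rw [List.foldl_cons, ih, declutterStep_getD, List.count_cons]
    by_cases hs : s = x <;> simp [hs] <;> omega

theorem declutter_eq_filter_count (souvenirs : List Int) (threshold : Int) :
    declutter souvenirs threshold
      = souvenirs.filter (fun v => decide ((souvenirs.count v : Int) < threshold)) := by
  unfold declutter
  refine List.filter_congr ?_
  intro s _
  have h := foldl_declutterStep_getD souvenirs PySem.Dict.empty s
  simp [PySem.Dict.getD_empty] at h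
  simp [h]

theorem foldB_char (t : Int) (l : List Int) (hs : List.Pairwise (· ≤ ·) l) :
    (l = [] ∧ l.foldl (declutterRunStep t) (PySem.Set.empty, none, 0) = (PySem.Set.empty, none, 0)) ∨
    (∃ q x k C, l = q ++ List.replicate (k + 1) x ∧ x ∉ q ∧
      l.foldl (declutterRunStep t) (PySem.Set.empty, none, 0) = (C, some x, (k : Int) + 1) ∧
      ∀ v : Int, (some v ∈ C ↔ v ∈ q ∧ t ≤ (q.count v : Int))) := by
  induction l using List.reverseRecOn with
  | nil => exact Or.inl ⟨rfl, rfl⟩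
  | append_singleton l y ih =>
    have hsl : List.Pairwise (· ≤ ·) l := (List.pairwise_append.1 hs).1
    have hle : ∀ a ∈ l, a ≤ y := by
      intro a ha
      exact (List.pairwise_append.1 hs).2.2 a ha y (by simp)
    rcases ih hsl with ⟨hnil, hfold⟩ | ⟨q, x, k, C, hdec, hxq, hfold, hmem⟩
    · subst hnil
      refine Or.inr ⟨[], y, 0, if t ≤ 0 then PySem.Set.add PySem.Set.empty none else PySem.Set.empty,
        by simp, by simp, ?_, ?_⟩
      · simp [declutterRunStep]
      · intro v
        constructor
        · intro hv
          exfalso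
          by_cases ht : t ≤ 0 <;> simp [ht, PySem.Set.empty, PySem.Set.add] at hv
        · rintro ⟨h, -⟩; simp at h
    · rw [List.foldl_append, List.foldl_cons, List.foldl_nil, hfold]
      by_cases hyx : y = x
      · subst hyx
        refine Or.inr ⟨q, y, k + 1, C, ?_, hxq, ?_, hmem⟩
        · rw [hdec]
          simp [List.append_assoc, ← List.replicate_succ']
        · have h0 : (0 : Int) < (k : Int) + 1 := by positivity
          simp [declutterRunStep, h0]
      · have hxl : x ∈ l := by simp [hdec]
        have hxy : x ≤ y := hle x hxl
        have hxy' : x ≠ y := fun h => hyx h.symm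
        have hynq : y ∉ q := by
          intro hyq
          have h1 : y ≤ x :=
            (List.pairwise_append.1 (hdec ▸ hsl)).2.2 y hyq x (by simp)
          exact hyx (le_antisymm h1 hxy)
        refine Or.inr ⟨q ++ List.replicate (k + 1) x, y, 0,
          if t ≤ (k : Int) + 1 then C.add (some x) else C, by rw [hdec]; simp, ?_, ?_, ?_⟩
        · simp [hynq, hyx]
        · simp [declutterRunStep, hxy']
        · intro v
          have hcq : q.count x = 0 := List.count_eq_zero_of_not_mem hxq
          by_cases hv : v = x
          · subst hv
            by_cases ht : t ≤ (k : Int) + 1 <;>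
              simp [ht, hmem, hxq, hcq, List.count_append]
          · have hv' : x ≠ v := Ne.symm hv
            by_cases ht : t ≤ (k : Int) + 1 <;>
              simp [ht, PySem.Set.mem_add, hmem, hv, hv', List.count_append,
                List.count_replicate]

theorem declutter_alt_eq_filter_count (souvenirs : List Int) (threshold : Int) :
    declutter_alt souvenirs threshold
      = souvenirs.filter (fun v => decide ((souvenirs.count v : Int) < threshold)) := by
  unfold declutter_alt
  set l := PySem.List.sorted souvenirs (fun v => v) false with hl
  have hperm : l.Perm souvenirs := PySem.List.sorted_perm souvenirs (fun v => v) false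
  have hpw : List.Pairwise (· ≤ ·) l := by
    have := PySem.List.sorted_pairwise souvenirs (fun v => v)
    simpa using this
  rcases foldB_char threshold l hpw with ⟨hnil, hfold⟩ | ⟨q, x, k, C, hdec, hxq, hfold, hmem⟩
  · have hs0 : souvenirs = [] := (hnil ▸ hperm).symm.eq_nil
    subst hs0
    simp
  · rw [hfold]
    refine List.filter_congr ?_
    intro v hv
    have hvl : v ∈ l := hperm.mem_iff.mpr hv
    have hcl : l.count v = souvenirs.count v := hperm.count_eq v
    have hcq : q.count x = 0 := List.count_eq_zero_of_not_mem hxq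
    have hmem' : (some v ∈ (if threshold ≤ (k : Int) + 1 then C.add (some x) else C))
        ↔ threshold ≤ (l.count v : Int) := by
      by_cases h : v = x
      · subst h
        by_cases ht : threshold ≤ (k : Int) + 1 <;>
          simp [ht, hmem, hxq, hcq, hdec, List.count_append]
      · have h' : x ≠ v := Ne.symm h
        have hvq : v ∈ q := by
          rcases (by simpa [hdec] using hvl : v ∈ q ∨ v = x) with h1 | h1
          · exact h1
          · exact absurd h1 h
        by_cases ht : threshold ≤ (k : Int) + 1 <;>
          simp [ht, PySem.Set.mem_add, hmem, h, h', hvq, hdec, List.count_append,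
            List.count_replicate]
    have hiff : (PySem.Set.contains (if threshold ≤ (k : Int) + 1 then C.add (some x) else C)
        (some v) = true) ↔ threshold ≤ (souvenirs.count v : Int) := by
      rw [PySem.Set.contains_iff, hmem', hcl]
    by_cases h2 : threshold ≤ (souvenirs.count v : Int)
    · rw [hiff.mpr h2]
      simp
      omega
    · have hf : PySem.Set.contains (if threshold ≤ (k : Int) + 1 then C.add (some x) else C)
          (some v) = false := by
        rw [← Bool.not_eq_true]
        exact fun hh => h2 (hiff.mp hh)
      rw [hf]
      simp
      omega

-- ===== VERDICT (by name: the statement is the Claim_ definition above) =====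
theorem declutter_spec : Claim_equal_declutter := by
  intro souvenirs threshold _
  unfold Spec_declutter
  rw [declutter_eq_filter_count, declutter_alt_eq_filter_count]
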